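-- pv_equiv track=rewrite | github.com/muhammadaliAbdullayevv/pdf-audio-kitoblar-bot | upload_flow.py | _coerce_int_id_list
-- ===== SOURCE A (Python) =====
-- from typing import Any
--
-- def _coerce_int_id_list(raw: Any) -> list[int]:
--     values: list[Any]
--     if raw is None:
--         values = []
--     elif isinstance(raw, (list, tuple, set)):
--         values = list(raw)
--     else:
--         values = str(raw).split(",")
--
--     out: list[int] = []
--     seen: set[int] = set()
--     for item in values:
--         text = str(item).strip()
--         if not text:
--             continue
--         try:
--             value = int(text)
--         except Exception:
--             continue
--         if value == 0 or value in seen: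
--             continue
--         seen.add(value)
--         out.append(value)
--     return out
-- ===== SOURCE B (Python) =====
-- def _parse_nonzero_int(item):
--     text = str(item).strip()
--     if not text:
--         return None
--     try:
--         value = int(text)
--     except Exception:
--         return None
--     return value if value != 0 else None
--
--
-- def _coerce_int_id_list(raw):
--     if raw is None:
--         values = []
--     elif isinstance(raw, (list, tuple, set)):
--         values = list(raw)
--     else:
--         values = str(raw).split(",")
--     # pass 1: parse/filter
--     parsed = [v for v in (_parse_nonzero_int(item) for item in values)
--               if v is not None]
--     # pass 2: dedupe by repeated filtering -- no seen-set/dict: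
--     # take the head, then delete ALL its later occurrences before recursing.
--     out = []
--     while parsed:
--         head = parsed[0]
--         out.append(head)
--         parsed = [v for v in parsed[1:] if v != head]
--     return out
-- ===== Notes on version B (the rewrite author's own statement) =====
-- stated objective: alternative
-- what changed: Parsing is split into a mapped helper pass, and deduplication uses no seen-set/dict at all: it repeatedly takes the head and filters all its later occurrences out of the remaining list (quadratic worst case) instead of A's single loop with a mutable seen-set.
import Mathlib
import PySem

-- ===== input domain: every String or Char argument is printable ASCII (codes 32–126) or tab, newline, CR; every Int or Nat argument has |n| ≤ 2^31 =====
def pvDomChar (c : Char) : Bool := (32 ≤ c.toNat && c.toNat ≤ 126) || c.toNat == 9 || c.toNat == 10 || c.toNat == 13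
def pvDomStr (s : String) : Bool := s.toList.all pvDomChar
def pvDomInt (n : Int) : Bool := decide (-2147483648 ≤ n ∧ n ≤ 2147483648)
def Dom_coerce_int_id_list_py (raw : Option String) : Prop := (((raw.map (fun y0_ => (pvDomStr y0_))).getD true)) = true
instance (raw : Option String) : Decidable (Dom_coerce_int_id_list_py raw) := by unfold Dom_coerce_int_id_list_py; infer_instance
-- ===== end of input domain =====

-- B splits parsing into a mapped helper pass and dedupes with no seen-set/dict at all:
-- repeatedly take the head and filter its later occurrences out of the rest (alternative decomposition).

-- ===== PORT A =====
-- one iteration of A's loop over (out, seen)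
def coerceStepA (st : List Int × PySem.Set Int) (item : String) : List Int × PySem.Set Int :=
  let text := PySem.Str.strip item
  if text = "" then st
  else
    match PySem.Int.ofStr? text with
    | none => st
    | some value =>
      if value = 0 || PySem.Set.contains st.2 value then st
      else (st.1 ++ [value], PySem.Set.add st.2 value)

def coerce_int_id_list_py (raw : Option String) : List Int :=
  let values : List String :=
    match raw with
    | none => []
    | some s => (PySem.Str.split? s ",").getD []
  (values.foldl coerceStepA ([], PySem.Set.empty)).1

-- ===== PORT B =====
-- B's helper _parse_nonzero_int
def parseNonzeroInt (item : String) : Option Int :=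
  let text := PySem.Str.strip item
  if text = "" then none
  else
    match PySem.Int.ofStr? text with
    | none => none
    | some value => if value ≠ 0 then some value else none

-- B's while loop: take the head, filter all its occurrences from the rest, recurse
def dedupFilter : List Int → List Int
  | [] => []
  | x :: rest => x :: dedupFilter (rest.filter (fun v => v ≠ x))
termination_by xs => xs.length
decreasing_by
  simp only [List.length_cons, List.length_unattach, Nat.lt_succ_iff]
  exact le_trans (List.length_filter_le _ _) (by simp)

def coerce_int_id_list_py_alt (raw : Option String) : List Int :=
  let values : List String :=
    match raw with
    | none => []
    | some s => (PySem.Str.split? s ",").getD []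
  dedupFilter (values.filterMap parseNonzeroInt)

-- ===== PRECONDITION & SPEC =====
def Spec_coerce_int_id_list_py (raw : Option String) (out : List Int) : Prop := out = coerce_int_id_list_py_alt raw
instance (raw : Option String) (out : List Int) : Decidable (Spec_coerce_int_id_list_py raw out) := by unfold Spec_coerce_int_id_list_py; infer_instance

-- ===== CLAIM (what is proved, stated in full; the proofs are below) =====
def Claim_equal_coerce_int_id_list_py : Prop := ∀ (raw : Option String), Dom_coerce_int_id_list_py raw → Spec_coerce_int_id_list_py raw (coerce_int_id_list_py raw)

-- ===== LEMMAS AND PROOFS =====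

-- on a diagonal state (s, s), A's loop step is Set.add by the parsed value
theorem coerceStepA_diag (s : PySem.Set Int) (item : String) :
    coerceStepA (s, s) item =
      (match parseNonzeroInt item with
       | none => (s, s)
       | some v => (PySem.Set.add s v, PySem.Set.add s v)) := by
  unfold coerceStepA parseNonzeroInt
  by_cases h : PySem.Str.strip item = ""
  · simp [h]
  · simp only [h, if_false]
    cases hv : PySem.Int.ofStr? (PySem.Str.strip item) with
    | none => simp
    | some v =>
      by_cases hz : v = 0
      · simp [hz]
      · by_cases hm : v ∈ s
        · simp [hz, hm, PySem.Set.add]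
        · simp [hz, hm, PySem.Set.add]

theorem foldl_coerceStepA_diag (items : List String) (s : PySem.Set Int) :
    items.foldl coerceStepA (s, s) =
      (List.foldl PySem.Set.add s (items.filterMap parseNonzeroInt),
       List.foldl PySem.Set.add s (items.filterMap parseNonzeroInt)) := by
  induction items generalizing s with
  | nil => simp
  | cons h t ih =>
    rw [List.foldl_cons, coerceStepA_diag]
    cases hp : parseNonzeroInt h with
    | none => simpa [hp] using ih s
    | some v => simpa [hp] using ih (PySem.Set.add s v)

-- unfolding equations for dedupFilter
theorem dedupFilter_nil : dedupFilter [] = [] := by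
  unfold dedupFilter
  rfl

theorem dedupFilter_cons (x : Int) (rest : List Int) :
    dedupFilter (x :: rest) = x :: dedupFilter (rest.filter (fun v => v ≠ x)) := by
  conv_lhs => unfold dedupFilter

-- A's seen-set fold equals B's repeated-filtering dedup, relative to an accumulator
theorem foldl_add_eq_dedupFilter (xs : List Int) (s : List Int) :
    List.foldl PySem.Set.add s xs = s ++ dedupFilter (xs.filter (fun v => ¬ v ∈ s)) := by
  induction xs generalizing s with
  | nil => simp [dedupFilter_nil]
  | cons x xs ih =>
    rw [List.foldl_cons]
    by_cases hx : x ∈ s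
    · have hadd : PySem.Set.add s x = s := by simp [PySem.Set.add, hx]
      rw [hadd, ih s]
      simp [hx]
    · have hadd : PySem.Set.add s x = s ++ [x] := by simp [PySem.Set.add, hx]
      rw [hadd, ih (s ++ [x])]
      have hfil : xs.filter (fun v => decide ¬ v ∈ s ++ [x])
          = (xs.filter (fun v => decide ¬ v ∈ s)).filter (fun v => decide (v ≠ x)) := by
        rw [List.filter_filter]
        apply List.filter_congr
        intro a _
        by_cases h1 : a ∈ s <;> by_cases h2 : a = x <;> simp [h1, h2]
      rw [hfil]
      have : (x :: xs.filter (fun v => decide ¬ v ∈ s)) =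
          (x :: xs).filter (fun v => decide ¬ v ∈ s) := by simp [hx]
      rw [← this, dedupFilter_cons]
      simp

theorem coerce_eq (raw : Option String) :
    coerce_int_id_list_py raw = coerce_int_id_list_py_alt raw := by
  unfold coerce_int_id_list_py coerce_int_id_list_py_alt
  cases raw with
  | none => simp [dedupFilter_nil]
  | some s =>
    simp only []
    rw [show (PySem.Set.empty : PySem.Set Int) = ([] : List Int) from rfl,
        foldl_coerceStepA_diag, foldl_add_eq_dedupFilter]
    simp

-- ===== VERDICT (by name: the statement is the Claim_ definition above) =====
theorem coerce_int_id_list_py_spec : Claim_equal_coerce_int_id_list_py := by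
  intro raw _
  exact coerce_eq raw
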